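-- pv_equiv track=rewrite | github.com/johnmoses/zero-to-hero-python-dsa | bits/binary_xor.py | binary_xor
-- ===== SOURCE A (Python) =====
-- def binary_xor(a: int, b: int) -> str:
--     """
--     Take 2 integers and convert to binary
--     using xor operation
--     Return a binary number
--     """
--     if a < 0 or b < 0:
--         raise ValueError("input must be positive integers")
--     bin_a = str(bin(a))[2:]
--     bin_b = str(bin(b))[2:]
--
--     max_len = max(len(bin_a), len(bin_b))
--
--     return "00" + "".join(
--         str(int(char_a != char_b))
--         for char_a, char_b in zip(bin_a.zfill(max_len), bin_b.zfill(max_len))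
--     )
-- ===== SOURCE B (Python) =====
-- def binary_xor(a: int, b: int) -> str:
--     if a < 0 or b < 0:
--         raise ValueError("input must be positive integers")
--     width = max(a.bit_length(), b.bit_length(), 1)
--     return "00" + format(a ^ b, 'b').zfill(width)
-- ===== Notes on version B (the rewrite author's own statement) =====
-- stated objective: idiomatic
-- what changed: Replaces the per-bit comparison over two zipped, zero-filled binary strings by a single native integer XOR formatted once as a zero-padded binary string of width max(bit_length, 1).
import Mathlib
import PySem

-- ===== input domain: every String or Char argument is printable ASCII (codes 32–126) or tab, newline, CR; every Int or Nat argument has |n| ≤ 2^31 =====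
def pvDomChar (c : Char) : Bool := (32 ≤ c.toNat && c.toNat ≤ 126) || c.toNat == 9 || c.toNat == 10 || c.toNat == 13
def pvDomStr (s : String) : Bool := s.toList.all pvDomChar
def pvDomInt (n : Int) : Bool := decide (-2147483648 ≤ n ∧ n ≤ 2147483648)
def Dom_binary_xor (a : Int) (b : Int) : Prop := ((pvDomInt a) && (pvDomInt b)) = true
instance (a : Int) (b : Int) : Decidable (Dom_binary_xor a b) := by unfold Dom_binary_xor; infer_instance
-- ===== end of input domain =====

-- B replaces A's per-bit comparison of two zero-filled binary strings by one native
-- integer XOR followed by a single zero-padded binary formatting (more idiomatic).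
-- A raises ValueError on negative input (and so does B); those inputs are outside Pre_.

-- ===== PORT A =====

-- binary digits of n, most significant first, empty for 0 (the digits of bin(n) after '0b')
def pvRawBits (n : Nat) : List Char :=
  if h : n = 0 then []
  else pvRawBits (n / 2) ++ [if n % 2 = 1 then '1' else '0']
decreasing_by exact Nat.div_lt_self (Nat.pos_of_ne_zero h) (by norm_num)

-- Python bin(n)[2:] for n ≥ 0, as a list of chars
def pvBin (n : Nat) : List Char := if n = 0 then ['0'] else pvRawBits n

-- Python str.zfill on a list of chars
def pvZfill (m : Nat) (s : List Char) : List Char := List.replicate (m - s.length) '0' ++ s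

def binary_xor (a : Int) (b : Int) : String :=
  if a < 0 ∨ b < 0 then ""  -- Python raises ValueError here (outside Pre_)
  else
    let bin_a := pvBin a.toNat
    let bin_b := pvBin b.toNat
    let max_len := max bin_a.length bin_b.length
    String.mk ('0' :: '0' ::
      List.zipWith (fun ca cb => if ca ≠ cb then '1' else '0')
        (pvZfill max_len bin_a) (pvZfill max_len bin_b))

-- ===== PORT B =====

-- Python int.bit_length() for n ≥ 0
def pvBitLen (n : Nat) : Nat :=
  if h : n = 0 then 0 else pvBitLen (n / 2) + 1
decreasing_by exact Nat.div_lt_self (Nat.pos_of_ne_zero h) (by norm_num)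

def binary_xor_alt (a : Int) (b : Int) : String :=
  if a < 0 ∨ b < 0 then ""  -- same ValueError guard as A (outside Pre_)
  else
    let width := max (max (pvBitLen a.toNat) (pvBitLen b.toNat)) 1
    String.mk ('0' :: '0' :: pvZfill width (pvBin (a.toNat ^^^ b.toNat)))

-- ===== PRECONDITION & SPEC =====
-- Pre_ excludes exactly the inputs on which A raises ValueError (a negative argument).
def Pre_binary_xor (a : Int) (b : Int) : Prop := 0 ≤ a ∧ 0 ≤ b
instance (a : Int) (b : Int) : Decidable (Pre_binary_xor a b) := by unfold Pre_binary_xor; infer_instance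
def pvWitness_binary_xor : Int × Int := (5, 3)

def Spec_binary_xor (a : Int) (b : Int) (out : String) : Prop := out = binary_xor_alt a b
instance (a : Int) (b : Int) (out : String) : Decidable (Spec_binary_xor a b out) := by unfold Spec_binary_xor; infer_instance

-- ===== CLAIM (what is proved, stated in full; the proofs are below) =====
def Claim_equal_binary_xor : Prop := ∀ (a : Int) (b : Int), Dom_binary_xor a b → Pre_binary_xor a b → Spec_binary_xor a b (binary_xor a b)

-- ===== LEMMAS AND PROOFS =====

theorem pvRawBits_length (n : Nat) : (pvRawBits n).length = pvBitLen n := by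
  induction n using Nat.strong_induction_on with
  | _ n ih =>
    rw [pvRawBits, pvBitLen]
    split
    · simp
    · rename_i h
      simp [ih (n / 2) (Nat.div_lt_self (Nat.pos_of_ne_zero h) (by norm_num))]

theorem pvBitLen_le_iff (m n : Nat) : pvBitLen n ≤ m ↔ n < 2 ^ m := by
  induction m generalizing n with
  | zero =>
    rw [pvBitLen]
    split
    · rename_i h; subst h; simp
    · rename_i h; simp only [pow_zero]; omega
  | succ m ih =>
    rw [pvBitLen]
    split
    · rename_i h; subst h; simp
    · rename_i h
      have hrec := ih (n / 2)
      rw [pow_succ]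
      constructor
      · intro hle
        have : n / 2 < 2 ^ m := hrec.mp (by omega)
        omega
      · intro hlt
        have : n / 2 < 2 ^ m := by omega
        have := hrec.mpr this
        omega

theorem pvBin_length (n : Nat) : (pvBin n).length = max (pvBitLen n) 1 := by
  rw [pvBin]
  split
  · rename_i h; subst h; rw [pvBitLen]; simp
  · rename_i h
    rw [pvRawBits_length]
    have : 1 ≤ pvBitLen n := by
      rw [pvBitLen]; split
      · exact absurd ‹n = 0› h
      · omega
    omega

-- pulling one (least significant) digit off a zero-filled raw binary string
theorem pvZfill_rawBits_step (m n : Nat) (h : pvBitLen n ≤ m + 1) :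
    pvZfill (m + 1) (pvRawBits n)
      = pvZfill m (pvRawBits (n / 2)) ++ [if n % 2 = 1 then '1' else '0'] := by
  by_cases h0 : n = 0
  · subst h0
    simp [pvRawBits, pvZfill, List.replicate_succ' (n := m)]
  · rw [pvRawBits, dif_neg h0, pvZfill, pvZfill]
    have hlen : (pvRawBits (n / 2)).length = pvBitLen (n / 2) := pvRawBits_length _
    have hbl : pvBitLen n = pvBitLen (n / 2) + 1 := by rw [pvBitLen, dif_neg h0]
    simp only [List.length_append, List.length_cons, List.length_nil, hlen]
    have : m + 1 - (pvBitLen (n / 2) + 1) = m - pvBitLen (n / 2) := by omega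
    rw [this, List.append_assoc]

theorem pvZfill_zipWith_xor (m : Nat) : ∀ (a b : Nat), pvBitLen a ≤ m → pvBitLen b ≤ m →
    List.zipWith (fun ca cb => if ca ≠ cb then '1' else '0')
      (pvZfill m (pvRawBits a)) (pvZfill m (pvRawBits b))
      = pvZfill m (pvRawBits (a ^^^ b)) := by
  induction m with
  | zero =>
    intro a b ha hb
    have ha' : a = 0 := by have := (pvBitLen_le_iff 0 a).mp ha; simpa using this
    have hb' : b = 0 := by have := (pvBitLen_le_iff 0 b).mp hb; simpa using this
    subst ha'; subst hb'
    simp [pvRawBits, pvZfill]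
  | succ m ih =>
    intro a b ha hb
    have hx : pvBitLen (a ^^^ b) ≤ m + 1 := by
      rw [pvBitLen_le_iff]
      exact Nat.xor_lt_two_pow ((pvBitLen_le_iff _ _).mp ha) ((pvBitLen_le_iff _ _).mp hb)
    rw [pvZfill_rawBits_step m a ha, pvZfill_rawBits_step m b hb, pvZfill_rawBits_step m _ hx]
    have hda : pvBitLen (a / 2) ≤ m := by
      rw [pvBitLen_le_iff]
      have := (pvBitLen_le_iff (m + 1) a).mp ha
      have : a < 2 ^ m * 2 := by rw [← pow_succ]; exact this
      omega
    have hdb : pvBitLen (b / 2) ≤ m := by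
      rw [pvBitLen_le_iff]
      have := (pvBitLen_le_iff (m + 1) b).mp hb
      have : b < 2 ^ m * 2 := by rw [← pow_succ]; exact this
      omega
    have hlena : (pvZfill m (pvRawBits (a / 2))).length = m := by
      rw [pvZfill, List.length_append, List.length_replicate, pvRawBits_length]; omega
    have hlenb : (pvZfill m (pvRawBits (b / 2))).length = m := by
      rw [pvZfill, List.length_append, List.length_replicate, pvRawBits_length]; omega
    rw [List.zipWith_append (by rw [hlena, hlenb])]
    rw [ih (a / 2) (b / 2) hda hdb, Nat.xor_div_two]
    congr 1
    have hxm : (a ^^^ b) % 2 = (a + b) % 2 := Nat.xor_mod_two_eq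
    have ha2 : a % 2 = 0 ∨ a % 2 = 1 := by omega
    have hb2 : b % 2 = 0 ∨ b % 2 = 1 := by omega
    rcases ha2 with h1 | h1 <;> rcases hb2 with h2 | h2 <;>
      simp [List.zipWith, h1, h2, show (a ^^^ b) % 2 = (a + b) % 2 from hxm] <;> omega

theorem pvZfill_pvBin (m n : Nat) (hm : 1 ≤ m) :
    pvZfill m (pvBin n) = pvZfill m (pvRawBits n) := by
  rw [pvBin]
  split
  · rename_i h; subst h
    have h0 : pvRawBits 0 = [] := by rw [pvRawBits]; simp
    have hrep : List.replicate m '0' = List.replicate (m - 1) '0' ++ ['0'] := by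
      conv_lhs => rw [show m = (m - 1) + 1 from by omega]
      exact List.replicate_succ'
    simp [pvZfill, h0, hrep]
  · rfl

-- ===== VERDICT (by name: the statement is the Claim_ definition above) =====
theorem binary_xor_spec : Claim_equal_binary_xor := by
  intro a b _ hpre
  unfold Spec_binary_xor binary_xor binary_xor_alt
  rcases hpre with ⟨ha, hb⟩
  rw [if_neg (by omega), if_neg (by omega)]
  set x := a.toNat
  set y := b.toNat
  have hml : max (pvBin x).length (pvBin y).length = max (max (pvBitLen x) (pvBitLen y)) 1 := by
    rw [pvBin_length, pvBin_length]; omega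
  set m := max (max (pvBitLen x) (pvBitLen y)) 1 with hm
  have hm1 : 1 ≤ m := le_max_right _ _
  have hax : pvBitLen x ≤ m := le_trans (le_max_left _ _) (le_max_left _ _)
  have hay : pvBitLen y ≤ m := le_trans (le_max_right _ _) (le_max_left _ _)
  simp only [hml]
  rw [pvZfill_pvBin m x hm1, pvZfill_pvBin m y hm1, pvZfill_pvBin m (x ^^^ y) hm1,
    pvZfill_zipWith_xor m x y hax hay]
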